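-- pv_equiv track=rewrite | github.com/warrenmo/coding-exercises | skyscraper.py | is_clue_satisfied
-- ===== SOURCE A (Python) =====
-- def is_clue_satisfied(line, clue_lt, clue_rb):
--     seen_lt = seen_rb = 0
--     max_lt = max_rb = float('-inf')
--     n = len(line)
--     for i in range(n):
--         if line[i] > max_lt:
--             seen_lt += 1
--             max_lt = line[i]
--         if line[n-i-1] > max_rb:
--             seen_rb += 1
--             max_rb = line[n-i-1]
--     exists_clue = lambda x, y: x if x != 0 else y
--     clue_lt_ = exists_clue(clue_lt, seen_lt)
--     clue_rb_ = exists_clue(clue_rb, seen_rb)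
--     return clue_lt_ == seen_lt and clue_rb_ == seen_rb
-- ===== SOURCE B (Python) =====
-- def is_clue_satisfied(line, clue_lt, clue_rb):
--     def count_visible(seq):
--         maxima = []
--         for x in seq:
--             maxima.append(x if not maxima or x > maxima[-1] else maxima[-1])
--         return len(set(maxima))
--     seen_lt = count_visible(line)
--     seen_rb = count_visible(line[::-1])
--     return (clue_lt == 0 or clue_lt == seen_lt) and (clue_rb == 0 or clue_rb == seen_rb)
-- ===== Notes on version B (the rewrite author's own statement) =====
-- stated objective: simpler
-- what changed: Replaces A's interleaved forward/backward index loop and lambda clue trick with a single helper count_visible that builds the running-maximum profile and counts its distinct values (len(set(...))), called on the line and its reversal, plus a direct boolean clue check.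
import Mathlib
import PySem

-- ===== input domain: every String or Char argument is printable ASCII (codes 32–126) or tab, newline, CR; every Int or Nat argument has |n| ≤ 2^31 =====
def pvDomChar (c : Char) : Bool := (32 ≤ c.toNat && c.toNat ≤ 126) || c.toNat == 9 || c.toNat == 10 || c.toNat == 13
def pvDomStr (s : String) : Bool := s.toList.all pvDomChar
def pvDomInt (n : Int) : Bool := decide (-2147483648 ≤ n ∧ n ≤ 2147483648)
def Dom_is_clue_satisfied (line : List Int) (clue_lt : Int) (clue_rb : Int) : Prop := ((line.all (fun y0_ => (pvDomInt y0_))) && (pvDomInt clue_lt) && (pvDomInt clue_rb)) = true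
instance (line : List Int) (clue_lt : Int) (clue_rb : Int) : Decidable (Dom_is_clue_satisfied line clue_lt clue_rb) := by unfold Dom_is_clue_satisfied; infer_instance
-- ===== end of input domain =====

-- B builds the running-maximum profile with a helper called on the line and its reversal and
-- counts its distinct values, instead of A's interleaved forward/backward index loop (objective: simpler).

-- ===== PORT A =====
-- 'x > float("-inf")' is true for every int x: the running maximum is ported as Option Int, none = -inf.
def pvGtO (x : Int) : Option Int → Bool
  | none => true
  | some m => decide (m < x)

def is_clue_satisfied (line : List Int) (clue_lt : Int) (clue_rb : Int) : Bool :=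
  let n : Int := line.length
  let st := (PySem.List.pyRange 0 n 1).foldl
    (fun (st : (Int × Option Int) × (Int × Option Int)) i =>
      ((if pvGtO (PySem.List.pyGetD line i 0) st.1.2
          then (st.1.1 + 1, some (PySem.List.pyGetD line i 0)) else st.1),
       (if pvGtO (PySem.List.pyGetD line (n - i - 1) 0) st.2.2
          then (st.2.1 + 1, some (PySem.List.pyGetD line (n - i - 1) 0)) else st.2)))
    ((0, none), (0, none))
  let clue_lt_ : Int := if clue_lt ≠ 0 then clue_lt else st.1.1
  let clue_rb_ : Int := if clue_rb ≠ 0 then clue_rb else st.2.1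
  clue_lt_ == st.1.1 && clue_rb_ == st.2.1

-- ===== PORT B =====
-- count_visible: build the running-maximum profile (maxima), return the number of its distinct values.
def pvCountVisible (seq : List Int) : Int :=
  let maxima := seq.foldl
    (fun m x => m ++ [if m.isEmpty || decide (PySem.List.pyGetD m (-1) 0 < x)
                      then x else PySem.List.pyGetD m (-1) 0]) ([] : List Int)
  ((PySem.Set.ofList maxima).length : Int)

def is_clue_satisfied_alt (line : List Int) (clue_lt : Int) (clue_rb : Int) : Bool :=
  let seen_lt := pvCountVisible line
  -- line[::-1]; slice? is never none for step -1, the getD [] is unreachable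
  let seen_rb := pvCountVisible ((PySem.List.slice? line none none (-1)).getD [])
  (clue_lt == 0 || clue_lt == seen_lt) && (clue_rb == 0 || clue_rb == seen_rb)

-- ===== PRECONDITION & SPEC =====
def Spec_is_clue_satisfied (line : List Int) (clue_lt : Int) (clue_rb : Int) (out : Bool) : Prop := out = is_clue_satisfied_alt line clue_lt clue_rb
instance (line : List Int) (clue_lt : Int) (clue_rb : Int) (out : Bool) : Decidable (Spec_is_clue_satisfied line clue_lt clue_rb out) := by unfold Spec_is_clue_satisfied; infer_instance

-- ===== CLAIM (what is proved, stated in full; the proofs are below) =====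
def Claim_equal_is_clue_satisfied : Prop := ∀ (line : List Int) (clue_lt : Int) (clue_rb : Int), Dom_is_clue_satisfied line clue_lt clue_rb → Spec_is_clue_satisfied line clue_lt clue_rb (is_clue_satisfied line clue_lt clue_rb)

-- ===== LEMMAS AND PROOFS =====

-- record count of a list, continuing from running maximum c (none = -inf)
def pvRecC : Option Int → List Int → Nat
  | _, [] => 0
  | c, x :: xs => if pvGtO x c then 1 + pvRecC (some x) xs else pvRecC c xs

-- the single-direction step of A's loop
def pvStepA (s : Int × Option Int) (a : Int) : Int × Option Int :=
  if pvGtO a s.2 then (s.1 + 1, some a) else s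

-- running-maximum profile, continuing from c
def pvPm : Option Int → List Int → List Int
  | _, [] => []
  | c, x :: xs => (if pvGtO x c then x else c.getD 0) :: pvPm (some (if pvGtO x c then x else c.getD 0)) xs

-- the step of B's profile loop
def pvStepB (m : List Int) (x : Int) : List Int :=
  m ++ [if m.isEmpty || decide (PySem.List.pyGetD m (-1) 0 < x) then x else PySem.List.pyGetD m (-1) 0]

theorem pvFoldl_split {α β γ : Type} (f : α → γ → α) (g : β → γ → β) (xs : List γ) (a : α) (b : β) :
    xs.foldl (fun p c => (f p.1 c, g p.2 c)) (a, b) = (xs.foldl f a, xs.foldl g b) := by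
  induction xs generalizing a b with
  | nil => rfl
  | cons x xs ih => simpa using ih (f a x) (g b x)

theorem pvStepA_fst (xs : List Int) : ∀ (s : Int) (m : Option Int),
    (xs.foldl pvStepA (s, m)).1 = s + (pvRecC m xs : Int) := by
  induction xs with
  | nil => intro s m; simp [pvRecC]
  | cons x xs ih =>
    intro s m
    by_cases h : pvGtO x m = true
    · simp [pvStepA, pvRecC, h, ih]; ring
    · simp [pvStepA, pvRecC, h, ih]

theorem pvGetD_rev (line : List Int) (i : Int) (h0 : 0 ≤ i) (h1 : i < (line.length : Int)) :
    PySem.List.pyGetD line ((line.length : Int) - i - 1) 0 = PySem.List.pyGetD line.reverse i 0 := by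
  rw [PySem.List.pyGetD_eq_getElem line 0 (by omega) (by omega),
      PySem.List.pyGetD_eq_getElem line.reverse 0 h0 (by simpa using h1)]
  rw [List.getElem_reverse]
  congr 1
  omega

theorem pvFoldB_acc (xs : List Int) : ∀ (acc : List Int) (p : Int),
    xs.foldl pvStepB (acc ++ [p]) = acc ++ [p] ++ pvPm (some p) xs := by
  induction xs with
  | nil => intro acc p; simp [pvPm]
  | cons x xs ih =>
    intro acc p
    have hstep : pvStepB (acc ++ [p]) x = (acc ++ [p]) ++ [if pvGtO x (some p) then x else p] := by
      simp [pvStepB, PySem.List.pyGetD_neg_one_append_singleton, pvGtO]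
    simp only [List.foldl_cons, hstep, ih]
    simp [pvPm]

theorem pvFoldB_nil (xs : List Int) : xs.foldl pvStepB [] = pvPm none xs := by
  cases xs with
  | nil => rfl
  | cons x xs =>
    have hstep : pvStepB [] x = [] ++ [x] := by simp [pvStepB]
    simp only [List.foldl_cons, hstep]
    rw [pvFoldB_acc]
    simp [pvPm, pvGtO]

theorem pvPm_ge (xs : List Int) : ∀ (m z : Int), z ∈ pvPm (some m) xs → m ≤ z := by
  induction xs with
  | nil => intro m z h; simp [pvPm] at h
  | cons x xs ih =>
    intro m z h
    simp only [pvPm, pvGtO, List.mem_cons] at h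
    by_cases hx : m < x
    · simp [hx] at h
      rcases h with h | h
      · omega
      · have := ih x z (by simpa [hx] using h); omega
    · simp [hx] at h
      rcases h with h | h
      · omega
      · exact ih m z (by simpa [hx] using h)

theorem pvDedup_pm (xs : List Int) : ∀ m : Int,
    (m :: pvPm (some m) xs).dedup.length = 1 + pvRecC (some m) xs := by
  induction xs with
  | nil => intro m; simp [pvPm, pvRecC]
  | cons x xs ih =>
    intro m
    by_cases hx : m < x
    · have hpm : pvPm (some m) (x :: xs) = x :: pvPm (some x) xs := by
        simp [pvPm, pvGtO, hx]
      have hnot : m ∉ (x :: pvPm (some x) xs) := by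
        intro hmem
        rcases List.mem_cons.mp hmem with h | h
        · omega
        · have := pvPm_ge xs x m h; omega
      rw [hpm, List.dedup_cons_of_notMem hnot, List.length_cons, ih x]
      simp [pvRecC, pvGtO, hx]
      omega
    · have hpm : pvPm (some m) (x :: xs) = m :: pvPm (some m) xs := by
        simp [pvPm, pvGtO, hx]
      rw [hpm, List.dedup_cons_of_mem (List.mem_cons_self), ih m]
      simp [pvRecC, pvGtO, hx]

theorem pvLen_ofList (l : List Int) : (PySem.Set.ofList l).length = l.dedup.length := by
  have hperm : (PySem.Set.ofList l).Perm l.dedup := by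
    rw [List.perm_ext_iff_of_nodup (PySem.Set.nodup_ofList l) l.nodup_dedup]
    intro a
    simp [PySem.Set.mem_ofList, List.mem_dedup]
  exact hperm.length_eq

theorem pvCountVisible_eq (seq : List Int) : pvCountVisible seq = (pvRecC none seq : Int) := by
  unfold pvCountVisible
  have hfold : seq.foldl
      (fun m x => m ++ [if m.isEmpty || decide (PySem.List.pyGetD m (-1) 0 < x)
                        then x else PySem.List.pyGetD m (-1) 0]) ([] : List Int)
      = pvPm none seq := pvFoldB_nil seq
  simp only [hfold, pvLen_ofList]
  cases seq with
  | nil => simp [pvPm, pvRecC]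
  | cons x xs =>
    have h1 : pvPm none (x :: xs) = x :: pvPm (some x) xs := by simp [pvPm, pvGtO]
    rw [h1, pvDedup_pm xs x]
    simp [pvRecC, pvGtO]

-- A's loop computes the record counts of line and of line.reverse
theorem pvA_counts (line : List Int) :
    ((PySem.List.pyRange 0 (line.length : Int) 1).foldl
      (fun (st : (Int × Option Int) × (Int × Option Int)) i =>
        ((if pvGtO (PySem.List.pyGetD line i 0) st.1.2
            then (st.1.1 + 1, some (PySem.List.pyGetD line i 0)) else st.1),
         (if pvGtO (PySem.List.pyGetD line ((line.length : Int) - i - 1) 0) st.2.2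
            then (st.2.1 + 1, some (PySem.List.pyGetD line ((line.length : Int) - i - 1) 0)) else st.2)))
      ((0, none), (0, none))).1.1 = (pvRecC none line : Int)
    ∧ ((PySem.List.pyRange 0 (line.length : Int) 1).foldl
      (fun (st : (Int × Option Int) × (Int × Option Int)) i =>
        ((if pvGtO (PySem.List.pyGetD line i 0) st.1.2
            then (st.1.1 + 1, some (PySem.List.pyGetD line i 0)) else st.1),
         (if pvGtO (PySem.List.pyGetD line ((line.length : Int) - i - 1) 0) st.2.2
            then (st.2.1 + 1, some (PySem.List.pyGetD line ((line.length : Int) - i - 1) 0)) else st.2)))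
      ((0, none), (0, none))).2.1 = (pvRecC none line.reverse : Int) := by
  have hsplit := pvFoldl_split
    (fun s i => pvStepA s (PySem.List.pyGetD line i 0))
    (fun s i => pvStepA s (PySem.List.pyGetD line ((line.length : Int) - i - 1) 0))
    (PySem.List.pyRange 0 (line.length : Int) 1)
    ((0 : Int), (none : Option Int)) ((0 : Int), (none : Option Int))
  have hbody : (PySem.List.pyRange 0 (line.length : Int) 1).foldl
      (fun (st : (Int × Option Int) × (Int × Option Int)) i =>
        ((if pvGtO (PySem.List.pyGetD line i 0) st.1.2
            then (st.1.1 + 1, some (PySem.List.pyGetD line i 0)) else st.1),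
         (if pvGtO (PySem.List.pyGetD line ((line.length : Int) - i - 1) 0) st.2.2
            then (st.2.1 + 1, some (PySem.List.pyGetD line ((line.length : Int) - i - 1) 0)) else st.2)))
      ((0, none), (0, none))
      = ((PySem.List.pyRange 0 (line.length : Int) 1).foldl
          (fun s i => pvStepA s (PySem.List.pyGetD line i 0)) (0, none),
         (PySem.List.pyRange 0 (line.length : Int) 1).foldl
          (fun s i => pvStepA s (PySem.List.pyGetD line ((line.length : Int) - i - 1) 0)) (0, none)) := by
    rw [← hsplit]; rfl
  rw [hbody]
  constructor
  · have hfwd : (PySem.List.pyRange 0 (line.length : Int) 1).foldl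
        (fun s i => pvStepA s (PySem.List.pyGetD line i 0)) ((0 : Int), (none : Option Int))
        = line.foldl pvStepA (0, none) :=
      PySem.List.foldl_pyRange_zero_pyGetD line 0 pvStepA _
    simpa [hfwd] using pvStepA_fst line 0 none
  · have hcongr : (PySem.List.pyRange 0 (line.length : Int) 1).foldl
        (fun s i => pvStepA s (PySem.List.pyGetD line ((line.length : Int) - i - 1) 0)) ((0 : Int), (none : Option Int))
        = (PySem.List.pyRange 0 (line.length : Int) 1).foldl
        (fun s i => pvStepA s (PySem.List.pyGetD line.reverse i 0)) ((0 : Int), (none : Option Int)) := by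
      apply PySem.List.foldl_congr_mem
      intro a x hx
      have hm := (PySem.List.mem_pyRange_one).mp hx
      rw [pvGetD_rev line x hm.1 hm.2]
    have hrev : (PySem.List.pyRange 0 (line.length : Int) 1).foldl
        (fun s i => pvStepA s (PySem.List.pyGetD line.reverse i 0)) ((0 : Int), (none : Option Int))
        = line.reverse.foldl pvStepA (0, none) := by
      have := PySem.List.foldl_pyRange_zero_pyGetD line.reverse 0 pvStepA
        ((0 : Int), (none : Option Int))
      simpa using this
    rw [hcongr, hrev]
    simpa using pvStepA_fst line.reverse 0 none

-- ===== VERDICT (by name: the statement is the Claim_ definition above) =====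
theorem is_clue_satisfied_spec : Claim_equal_is_clue_satisfied := by
  intro line clue_lt clue_rb _
  unfold Spec_is_clue_satisfied is_clue_satisfied is_clue_satisfied_alt
  obtain ⟨h1, h2⟩ := pvA_counts line
  simp only [h1, h2, pvCountVisible_eq, PySem.List.slice?_none_none_neg_one, Option.getD_some]
  by_cases hlt : clue_lt = 0 <;> by_cases hrb : clue_rb = 0
  · simp [hlt, hrb]
  · simp [hlt, hrb, beq_eq_false_iff_ne.mpr hrb]
  · simp [hlt, hrb, beq_eq_false_iff_ne.mpr hlt]
  · simp [hlt, hrb, beq_eq_false_iff_ne.mpr hlt, beq_eq_false_iff_ne.mpr hrb]
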